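-- pv_equiv track=rewrite | github.com/stirfrypapi/coding_challenges | coding_challenges/koddi_round_1.py | lotteryCoupons
-- ===== SOURCE A (Python) =====
-- def sum_digits(num):
--     sum = 0
--
--     while num:
--         digit = num % 10
--         num = int(num / 10)
--         sum += digit
--
--     return sum
--
-- def get_sum_digits(arr):
--     ans = [sum_digits(ticket) for ticket in arr]
--     return ans
--
-- def lotteryCoupons(n):
--     ticket_nums = [i for i in range(1, n+1)]
--     sum_ticket_num = get_sum_digits(ticket_nums)
--
--     counts = [0 for i in range(0, n+1)]
--     for sum in sum_ticket_num:
--         counts[sum] += 1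
--
--     max_sum = max(counts)
--
--     ans = 0
--     for i in range(1, n+1):
--         if counts[i] == max_sum:
--             ans += 1
--
--     return ans
-- ===== SOURCE B (Python) =====
-- def lotteryCoupons(n):
--     # digit DP: count integers in [0..m] by digit sum with a base-10 recurrence,
--     # instead of enumerating every ticket 1..n
--     if n < 1:
--         return 0
--     memo = {}
--
--     def g(m, s):
--         # number of integers x with 0 <= x <= m and digit sum s
--         if s < 0 or m < 0:
--             return 0
--         if m == 0:
--             return 1 if s == 0 else 0
--         if (m, s) in memo:
--             return memo[(m, s)]
--         q, r = divmod(m, 10)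
--         v = sum(g(q, s - d) for d in range(r + 1)) + \
--             sum(g(q - 1, s - d) for d in range(r + 1, 10))
--         memo[(m, s)] = v
--         return v
--
--     width = 0
--     t = n
--     while t:
--         width += 1
--         t //= 10
--     counts = [g(n, s) for s in range(1, 9 * width + 1)]
--     best = max(counts)
--     return counts.count(best)
-- ===== Notes on version B (the rewrite author's own statement) =====
-- stated objective: faster
-- what changed: A enumerates every ticket 1..n, computes each digit sum and tallies them in an O(n) counts array; B never enumerates tickets: it counts the integers in [0..n] having each digit sum with a memoized base-10 digit-DP recurrence (split on the last digit), then takes the max and tie count over the O(log n)-sized table.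
-- crash fix: For negative n A raises ValueError (max() of the empty counts list); B returns 0 there. — e.g. on lotteryCoupons(-1): A raises ValueError, B returns 0
import Mathlib
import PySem

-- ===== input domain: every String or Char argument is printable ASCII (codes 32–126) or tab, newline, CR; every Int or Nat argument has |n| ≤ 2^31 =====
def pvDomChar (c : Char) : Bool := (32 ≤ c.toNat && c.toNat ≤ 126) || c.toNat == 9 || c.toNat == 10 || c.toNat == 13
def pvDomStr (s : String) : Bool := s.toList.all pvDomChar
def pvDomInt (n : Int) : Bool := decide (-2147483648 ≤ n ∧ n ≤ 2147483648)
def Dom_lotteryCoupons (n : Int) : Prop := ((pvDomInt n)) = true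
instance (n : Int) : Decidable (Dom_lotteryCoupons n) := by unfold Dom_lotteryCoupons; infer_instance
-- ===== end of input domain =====

-- B replaces A's per-ticket enumeration (digit-summing every i in 1..n into an O(n) counts array)
-- by a digit-DP recurrence counting the integers in [0..n] per digit sum (measured asymptotically faster).


-- ===== PORT A =====
lemma tdiv10_lt (num : Int) (h : num ≠ 0) : (num.tdiv 10).natAbs < num.natAbs := by
  rw [Int.natAbs_tdiv]
  exact Nat.div_lt_self (by omega) (by norm_num)

-- 'int(num / 10)' truncates toward zero: exact as Int.tdiv for the |num| ≤ 2^31 domain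
def sumDigitsA (num : Int) (sum : Int) : Int :=
  if num = 0 then sum
  else sumDigitsA (num.tdiv 10) (sum + PySem.Int.mod num 10)
termination_by num.natAbs
decreasing_by exact tdiv10_lt _ (by assumption)

def lotteryCoupons (n : Int) : Int :=
  let ticket_nums := PySem.List.pyRange 1 (n + 1) 1
  let sum_ticket_num := ticket_nums.map (fun ticket => sumDigitsA ticket 0)
  let counts := sum_ticket_num.foldl
    (fun counts sum => PySem.List.pySetD counts sum (PySem.List.pyGetD counts sum 0 + 1))
    ((PySem.List.pyRange 0 (n + 1) 1).map (fun _ => (0 : Int)))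
  -- max(counts): none (empty list, ValueError) is unreachable under Pre_ (n ≥ 0)
  let max_sum := (PySem.List.max? counts (fun y => y)).getD 0
  (PySem.List.pyRange 1 (n + 1) 1).foldl
    (fun ans i => if PySem.List.pyGetD counts i 0 = max_sum then ans + 1 else ans) 0

-- ===== PORT B =====
lemma floordiv10_facts (m : Int) :
    PySem.Int.floordiv m 10 = m / 10 ∧ PySem.Int.mod m 10 = m % 10 := by
  constructor
  · simp [PySem.Int.floordiv, Int.fdiv_eq_ediv]
  · simp [PySem.Int.mod, Int.fmod_eq_emod]

-- 'sum(g(q, s - d) for d in range(lo, hi))' — the generator sums inside B's g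
def gTerms (f : Int → Int) (lo hi : Int) : Int := ((PySem.List.pyRange lo hi 1).map f).sum

-- g(m, s): number of integers in [0..m] with digit sum s, by the base-10 recurrence.
-- The Python memo cache is value-preserving; the port computes the same recurrence with a
-- structural fuel ≥ the recursion depth (the fuel-0 branch is unreachable: gN_stable below).
def gN : Nat → Int → Int → Int
  | 0, _, _ => 0
  | fuel + 1, m, s =>
    if s < 0 ∨ m < 0 then 0
    else if m = 0 then (if s = 0 then 1 else 0)
    else
      gTerms (fun d => gN fuel (PySem.Int.floordiv m 10) (s - d)) 0 (PySem.Int.mod m 10 + 1)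
        + gTerms (fun d => gN fuel (PySem.Int.floordiv m 10 - 1) (s - d)) (PySem.Int.mod m 10 + 1) 10

def gB (m s : Int) : Int := gN (m.toNat + 1) m s

-- 'while t: width += 1; t //= 10' — reached only with t = n ≥ 1, so 'while t' is 'while 0 < t'
def widthLoop (t w : Int) : Int :=
  if 0 < t then widthLoop (PySem.Int.floordiv t 10) (w + 1) else w
termination_by t.toNat
decreasing_by
  have h1 := (floordiv10_facts t).1
  omega

def lotteryCoupons_alt (n : Int) : Int :=
  if n < 1 then 0
  else
    let width := widthLoop n 0
    let counts := (PySem.List.pyRange 1 (9 * width + 1) 1).map (fun s => gB n s)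
    -- max(counts): the empty case (ValueError) is unreachable, width ≥ 1 for n ≥ 1
    let best := (PySem.List.max? counts (fun y => y)).getD 0
    ((counts.count best : Nat) : Int)

-- ===== PRECONDITION & SPEC =====
-- Pre_ excludes exactly the negative n, where A raises ValueError: counts is empty and max([]) fails.
def Pre_lotteryCoupons (n : Int) : Prop := 0 ≤ n
instance (n : Int) : Decidable (Pre_lotteryCoupons n) := by unfold Pre_lotteryCoupons; infer_instance
def pvWitness_lotteryCoupons : Int := 5

-- For negative n A raises ValueError (max() of the empty counts list); B returns 0 there.
def Raises_lotteryCoupons (n : Int) : Prop := n < 0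
instance (n : Int) : Decidable (Raises_lotteryCoupons n) := by unfold Raises_lotteryCoupons; infer_instance
def pvRaiseWitness_lotteryCoupons : Int := -1
def pvRaiseWitnessOut_lotteryCoupons : Int := 0

def Spec_lotteryCoupons (n : Int) (out : Int) : Prop := out = lotteryCoupons_alt n
instance (n : Int) (out : Int) : Decidable (Spec_lotteryCoupons n out) := by unfold Spec_lotteryCoupons; infer_instance

-- ===== CLAIM (what is proved, stated in full; the proofs are below) =====
def Claim_equal_lotteryCoupons : Prop := ∀ (n : Int), Dom_lotteryCoupons n → Pre_lotteryCoupons n → Spec_lotteryCoupons n (lotteryCoupons n)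
def Claim_raises_lotteryCoupons : Prop := (∀ (n : Int), Dom_lotteryCoupons n → Raises_lotteryCoupons n → ¬ Pre_lotteryCoupons n) ∧ (Dom_lotteryCoupons (pvRaiseWitness_lotteryCoupons) ∧ Raises_lotteryCoupons (pvRaiseWitness_lotteryCoupons) ∧ lotteryCoupons_alt (pvRaiseWitness_lotteryCoupons) = pvRaiseWitnessOut_lotteryCoupons)

-- ===== LEMMAS AND PROOFS =====

lemma pymod10 (a : Int) : PySem.Int.mod a 10 = a % 10 := (floordiv10_facts a).2
lemma pydiv10 (a : Int) : PySem.Int.floordiv a 10 = a / 10 := (floordiv10_facts a).1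

-- ---- digit-sum lemmas (A's helper) ----
lemma sdA_eq (num s : Int) : sumDigitsA num s
    = if num = 0 then s else sumDigitsA (num.tdiv 10) (s + PySem.Int.mod num 10) := by
  rw [sumDigitsA]

lemma sdA_zero (s : Int) : sumDigitsA 0 s = s := by
  rw [sdA_eq]; simp

lemma sdA_acc (k : Nat) : ∀ (num s : Int), num.natAbs ≤ k → sumDigitsA num s = s + sumDigitsA num 0 := by
  induction k with
  | zero =>
    intro num s h
    have h0 : num = 0 := by omega
    subst h0
    rw [sdA_zero, sdA_zero]
    ring
  | succ k ih =>
    intro num s h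
    by_cases h0 : num = 0
    · subst h0; rw [sdA_zero, sdA_zero]; ring
    · have hd := tdiv10_lt num h0
      rw [sdA_eq num s, sdA_eq num 0]
      simp only [if_neg h0, zero_add]
      rw [ih (num.tdiv 10) (s + PySem.Int.mod num 10) (by omega),
        ih (num.tdiv 10) (PySem.Int.mod num 10) (by omega)]
      ring

lemma sdA_bounds (k : Nat) : ∀ i : Int, 0 < i → i.toNat ≤ k → 1 ≤ sumDigitsA i 0 ∧ sumDigitsA i 0 ≤ i := by
  induction k with
  | zero => intro i h1 h2; omega
  | succ k ih =>
    intro i h1 h2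
    have hne : i ≠ 0 := by omega
    have hd := tdiv10_lt i hne
    have htd : i.tdiv 10 = i / 10 := Int.tdiv_eq_ediv_of_nonneg (by omega)
    rw [sdA_eq]
    simp only [if_neg hne]
    rw [sdA_acc k _ _ (by omega), pymod10]
    by_cases hq : i.tdiv 10 = 0
    · rw [hq, sdA_zero]
      omega
    · have hqpos : 0 < i.tdiv 10 := by omega
      have := ih (i.tdiv 10) hqpos (by omega)
      omega

-- digit sum of 10*t + d splits
lemma sdA_split (t d : Int) (ht : 0 ≤ t) (hd0 : 0 ≤ d) (hd9 : d ≤ 9) :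
    sumDigitsA (10 * t + d) 0 = sumDigitsA t 0 + d := by
  by_cases hz : 10 * t + d = 0
  · have ht0 : t = 0 := by omega
    have hdz : d = 0 := by omega
    subst ht0; subst hdz
    simp [sdA_zero]
  · rw [sdA_eq]
    simp only [if_neg hz]
    have htd : (10 * t + d).tdiv 10 = t := by
      have : (10 * t + d).tdiv 10 = (10 * t + d) / 10 := Int.tdiv_eq_ediv_of_nonneg (by omega)
      rw [this]
      omega
    have hm : PySem.Int.mod (10 * t + d) 10 = d := by
      rw [pymod10]
      omega
    rw [htd, hm, zero_add, sdA_acc t.natAbs t d le_rfl]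
    ring

-- ---- unfolding lemmas for the DP ----
-- proof-side view of the generator sums: Σ_{d=lo}^{hi} gB q (s - d)
def gSum (q s lo hi : Int) : Int := ((PySem.List.pyRange lo (hi + 1) 1).map (fun d => gB q (s - d))).sum

lemma gSum_nil (q s lo hi : Int) (h : hi < lo) : gSum q s lo hi = 0 := by
  unfold gSum
  rw [PySem.List.pyRange_one_eq_nil (by omega)]
  simp

lemma gSum_cons (q s lo hi : Int) (h : lo ≤ hi) : gSum q s lo hi = gB q (s - lo) + gSum q s (lo + 1) hi := by
  unfold gSum
  rw [PySem.List.pyRange_one_cons (by omega)]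
  simp

lemma gSum_split_last (q s lo hi : Int) (h : lo ≤ hi) :
    gSum q s lo hi = gSum q s lo (hi - 1) + gB q (s - hi) := by
  unfold gSum
  rw [show hi - 1 + 1 = hi by ring, PySem.List.pyRange_one_succ_right (by omega)]
  simp

lemma gN_succ (fuel : Nat) (m s : Int) : gN (fuel + 1) m s
    = if s < 0 ∨ m < 0 then 0
      else if m = 0 then (if s = 0 then 1 else 0)
      else gTerms (fun d => gN fuel (PySem.Int.floordiv m 10) (s - d)) 0 (PySem.Int.mod m 10 + 1)
        + gTerms (fun d => gN fuel (PySem.Int.floordiv m 10 - 1) (s - d)) (PySem.Int.mod m 10 + 1) 10 := rfl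

lemma gB_neg (m s : Int) (h : m < 0 ∨ s < 0) : gB m s = 0 := by
  unfold gB
  rw [gN_succ]
  rcases h with h | h
  · rw [if_pos (Or.inr h)]
  · rw [if_pos (Or.inl h)]

lemma gB_zero (s : Int) : gB 0 s = if s = 0 then 1 else 0 := by
  unfold gB
  rw [show (0 : Int).toNat + 1 = 0 + 1 by norm_num, gN_succ]
  by_cases h : s < 0
  · rw [if_pos (Or.inl h), if_neg (by omega)]
  · rw [if_neg (by omega)]
    simp

lemma gSum_of_neg (q s lo hi : Int) (hq : q < 0) : gSum q s lo hi = 0 := by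
  unfold gSum
  apply List.sum_eq_zero
  intro x hx
  obtain ⟨d, _, rfl⟩ := List.mem_map.1 hx
  exact gB_neg q _ (Or.inl hq)

-- the fuel is irrelevant above the recursion depth
lemma gN_stable : ∀ (f1 f2 : Nat) (m s : Int), m.toNat < f1 → m.toNat < f2 →
    gN f1 m s = gN f2 m s := by
  intro f1
  induction f1 with
  | zero => intro f2 m s h1 h2; omega
  | succ k ih =>
    intro f2 m s h1 h2
    obtain ⟨l, rfl⟩ : ∃ l, f2 = l + 1 := ⟨f2 - 1, by omega⟩
    by_cases hg : s < 0 ∨ m < 0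
    · simp only [gN, if_pos hg]
    · by_cases h0 : m = 0
      · simp only [gN, if_neg hg, if_pos h0]
      · have hm1 : 1 ≤ m := by omega
        have hd := pydiv10 m
        simp only [gN, if_neg hg, if_neg h0]
        have hc : ∀ (q : Int), q.toNat < k → q.toNat < l →
            ∀ (lo hi : Int), gTerms (fun d => gN k q (s - d)) lo hi
              = gTerms (fun d => gN l q (s - d)) lo hi := by
          intro q hk hl lo hi
          unfold gTerms
          congr 1
          apply List.map_congr_left
          intro d _
          exact ih l q (s - d) hk hl
        rw [hc (PySem.Int.floordiv m 10) (by omega) (by omega),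
          hc (PySem.Int.floordiv m 10 - 1) (by omega) (by omega)]

-- the recurrence formula holds for every m ≥ 0 (at m = 0 both sides are the indicator)
lemma gB_formula (m s : Int) (hm : 0 ≤ m) (hs : 0 ≤ s) :
    gB m s = gSum (m / 10) s 0 (m % 10) + gSum (m / 10 - 1) s (m % 10 + 1) 9 := by
  by_cases h0 : m = 0
  · subst h0
    have e1 : (0 : Int) / 10 = 0 := by norm_num
    have e2 : (0 : Int) % 10 = 0 := by norm_num
    rw [e1, e2, gSum_cons 0 s 0 0 le_rfl,
      gSum_nil 0 s (0 + 1) 0 (by omega),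
      gSum_of_neg (0 - 1) s (0 + 1) 9 (by omega),
      sub_zero, gB_zero]
    ring
  · have hm1 : 1 ≤ m := by omega
    have hd := pydiv10 m
    have hmm := pymod10 m
    unfold gB
    rw [gN_succ, if_neg (show ¬ (s < 0 ∨ m < 0) by omega), if_neg h0]
    have hrw : ∀ (q : Int), q.toNat < m.toNat → ∀ (lo hi : Int),
        gTerms (fun d => gN m.toNat q (s - d)) lo hi
          = ((PySem.List.pyRange lo hi 1).map (fun d => gB q (s - d))).sum := by
      intro q hq lo hi
      unfold gTerms
      congr 1
      apply List.map_congr_left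
      intro d _
      exact gN_stable m.toNat (q.toNat + 1) q (s - d) (by omega) (by omega)
    rw [hrw (PySem.Int.floordiv m 10) (by omega),
      hrw (PySem.Int.floordiv m 10 - 1) (by omega)]
    unfold gSum
    rw [hd, hmm, show (9 : Int) + 1 = 10 by norm_num]

-- key step: g(m, s) = g(m-1, s) + [digitsum m = s], for m ≥ 1
lemma g_step (M : Nat) : ∀ (m : Int), 1 ≤ m → m.toNat ≤ M → ∀ s,
    gB m s = gB (m - 1) s + (if sumDigitsA m 0 = s then 1 else 0) := by
  induction M with
  | zero => intro m hm hM; omega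
  | succ M ih =>
    intro m hm hM s
    have hsd := sdA_bounds m.toNat m (by omega) le_rfl
    by_cases hs : s < 0
    · rw [gB_neg m s (Or.inr hs), gB_neg (m - 1) s (Or.inr hs), if_neg (by omega)]
      ring
    · push_neg at hs
      obtain ⟨q, r, hq, hr⟩ : ∃ q r, m / 10 = q ∧ m % 10 = r := ⟨_, _, rfl, rfl⟩
      have hm10 : m = 10 * q + r := by omega
      have hr0 : 0 ≤ r := by omega
      have hr9 : r ≤ 9 := by omega
      have hq0 : 0 ≤ q := by omega
      have hqm : q < m := by omega
      have hdsm : sumDigitsA m 0 = sumDigitsA q 0 + r := by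
        rw [hm10]; exact sdA_split q r hq0 hr0 hr9
      have hA := gB_formula m s (by omega) hs
      rw [hq, hr] at hA
      by_cases hr1 : 1 ≤ r
      · -- m - 1 = 10q + (r - 1)
        have hq' : (m - 1) / 10 = q := by omega
        have hr' : (m - 1) % 10 = r - 1 := by omega
        have hB := gB_formula (m - 1) s (by omega) hs
        rw [hq', hr'] at hB
        rw [gSum_split_last q s 0 r (by omega)] at hA
        rw [show r - 1 + 1 = r by ring] at hB
        rw [gSum_cons (q - 1) s r 9 (by omega)] at hB
        have hdiff : gB q (s - r) = gB (q - 1) (s - r) + (if sumDigitsA m 0 = s then 1 else 0) := by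
          by_cases hqz : q = 0
          · subst hqz
            rw [gB_zero, gB_neg (0 - 1) _ (Or.inl (by norm_num))]
            have hds : sumDigitsA m 0 = r := by rw [hdsm, sdA_zero]; ring
            rw [hds]
            by_cases he : s - r = 0
            · rw [if_pos he, if_pos (by omega)]
              ring
            · rw [if_neg he, if_neg (by omega)]
              ring
          · have := ih q (by omega) (by omega) (s - r)
            rw [this]
            by_cases he : sumDigitsA q 0 = s - r
            · rw [if_pos he, if_pos (by omega)]
            · rw [if_neg he, if_neg (by omega)]
        rw [hA, hB, hdiff]
        ring
      · -- r = 0, so q ≥ 1 and m - 1 = 10(q-1) + 9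
        have hrz : r = 0 := by omega
        have hq1 : 1 ≤ q := by omega
        have hq' : (m - 1) / 10 = q - 1 := by omega
        have hr' : (m - 1) % 10 = 9 := by omega
        have hB := gB_formula (m - 1) s (by omega) hs
        rw [hq', hr'] at hB
        rw [gSum_nil (q - 1 - 1) s (9 + 1) 9 (by norm_num)] at hB
        rw [hrz] at hA
        rw [gSum_cons q s 0 0 le_rfl, gSum_nil q s (0 + 1) 0 (by norm_num)] at hA
        rw [gSum_cons (q - 1) s 0 9 (by norm_num)] at hB
        have hdiff := ih q (by omega) (by omega) s
        have hds : sumDigitsA m 0 = sumDigitsA q 0 := by rw [hdsm, hrz]; ring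
        rw [sub_zero] at hA hB
        rw [hA, hB, hdiff, hds]
        ring
-- counting characterization: g(k, s) counts i in [0..k] with digit sum s
lemma g_cnt : ∀ (k : Nat) (s : Int),
    gB (k : Int) s = (((List.range (k + 1)).countP (fun i : Nat => sumDigitsA (i : Int) 0 == s)) : Int) := by
  intro k
  induction k with
  | zero =>
    intro s
    have h00 : sumDigitsA ((0 : Nat) : Int) 0 = 0 := by
      rw [show ((0 : Nat) : Int) = 0 from rfl, sdA_zero]
    rw [show ((0 : Nat) : Int) = 0 from rfl, gB_zero]
    simp only [Nat.zero_add, List.range_one, List.countP_cons, List.countP_nil, h00]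
    by_cases h : s = 0
    · simp [h]
    · simp [h, Ne.symm h]
  | succ k ih =>
    intro s
    have hcast : ((k + 1 : Nat) : Int) = (k : Int) + 1 := by push_cast; ring
    have hstep := g_step (k + 1) ((k : Int) + 1) (by omega) (by omega) s
    rw [hcast, hstep, show (k : Int) + 1 - 1 = (k : Int) by ring, ih s]
    conv_rhs => rw [List.range_succ]
    rw [List.countP_append]
    simp only [List.countP_cons, List.countP_nil]
    by_cases h : sumDigitsA ((k : Int) + 1) 0 = s
    · simp [hcast, h]
    · simp [hcast, h]

-- ---- width lemmas ----
lemma width_eq (t w : Int) : widthLoop t w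
    = if 0 < t then widthLoop (PySem.Int.floordiv t 10) (w + 1) else w := by
  rw [widthLoop]

lemma width_acc (k : Nat) : ∀ (t w : Int), t.toNat ≤ k → widthLoop t w = w + widthLoop t 0 := by
  induction k with
  | zero =>
    intro t w h
    rw [width_eq, width_eq t 0, if_neg (by omega), if_neg (by omega)]
    ring
  | succ k ih =>
    intro t w h
    by_cases hp : 0 < t
    · have hd := pydiv10 t
      rw [width_eq, width_eq t 0, if_pos hp, if_pos hp,
        ih _ (w + 1) (by omega), ih _ (0 + 1) (by omega)]
      ring
    · rw [width_eq, width_eq t 0, if_neg hp, if_neg hp]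
      ring

lemma width_nonneg (k : Nat) : ∀ (t : Int), t.toNat ≤ k → 0 ≤ widthLoop t 0 := by
  induction k with
  | zero => intro t h; rw [width_eq, if_neg (by omega)]
  | succ k ih =>
    intro t h
    by_cases hp : 0 < t
    · have hd := pydiv10 t
      rw [width_eq, if_pos hp, width_acc k _ _ (by omega)]
      have := ih (PySem.Int.floordiv t 10) (by omega)
      omega
    · rw [width_eq, if_neg hp]

lemma width_pos (t : Int) (h : 1 ≤ t) : 1 ≤ widthLoop t 0 := by
  have hd := pydiv10 t
  rw [width_eq, if_pos (by omega), width_acc (t.toNat) _ _ (by omega)]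
  have := width_nonneg (t.toNat) (PySem.Int.floordiv t 10) (by omega)
  omega

lemma width_mono (k : Nat) : ∀ (i t : Int), 0 ≤ i → i ≤ t → t.toNat ≤ k →
    widthLoop i 0 ≤ widthLoop t 0 := by
  induction k with
  | zero =>
    intro i t h0 h1 h2
    rw [width_eq, width_eq t 0, if_neg (by omega), if_neg (by omega)]
  | succ k ih =>
    intro i t h0 h1 h2
    by_cases hp : 0 < i
    · have hdi := pydiv10 i
      have hdt := pydiv10 t
      rw [width_eq, width_eq t 0, if_pos hp, if_pos (by omega),
        width_acc k (PySem.Int.floordiv i 10) (0 + 1) (by omega),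
        width_acc k (PySem.Int.floordiv t 10) (0 + 1) (by omega)]
      have := ih (PySem.Int.floordiv i 10) (PySem.Int.floordiv t 10) (by omega) (by omega) (by omega)
      omega
    · rw [width_eq i 0, if_neg hp]
      by_cases hpt : 0 < t
      · have hdt := pydiv10 t
        rw [width_eq, if_pos hpt, width_acc k (PySem.Int.floordiv t 10) (0 + 1) (by omega)]
        have := width_nonneg k (PySem.Int.floordiv t 10) (by omega)
        omega
      · rw [width_eq, if_neg hpt]

lemma ds_le_width (k : Nat) : ∀ (i : Int), 1 ≤ i → i.toNat ≤ k →
    sumDigitsA i 0 ≤ 9 * widthLoop i 0 := by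
  induction k with
  | zero => intro i h1 h2; omega
  | succ k ih =>
    intro i h1 h2
    have hne : i ≠ 0 := by omega
    have htd : i.tdiv 10 = i / 10 := Int.tdiv_eq_ediv_of_nonneg (by omega)
    have hd := pydiv10 i
    rw [sdA_eq, if_neg hne, sdA_acc (i.tdiv 10).natAbs _ _ le_rfl, pymod10,
      width_eq, if_pos (by omega),
      show i.tdiv 10 = PySem.Int.floordiv i 10 by omega,
      width_acc k (PySem.Int.floordiv i 10) (0 + 1) (by omega)]
    by_cases hq : PySem.Int.floordiv i 10 = 0
    · have h00 : widthLoop (0 : Int) 0 = 0 := by rw [width_eq, if_neg (by omega)]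
      rw [hq, sdA_zero, h00]
      omega
    · have := ih (PySem.Int.floordiv i 10) (by omega) (by omega)
      omega

-- ---- generic counting helpers ----
lemma getD_set_eq (l : List Int) (i j : Nat) (a : Int) (hj : j < l.length) :
    (l.set i a).getD j 0 = if i = j then a else l.getD j 0 := by
  simp [List.getD, List.getElem?_set]
  split_ifs <;> simp_all

lemma foldl_step_length (S : List Int) : ∀ cs : List Int,
    (S.foldl (fun c s => PySem.List.pySetD c s (PySem.List.pyGetD c s 0 + 1)) cs).length = cs.length := by
  induction S with
  | nil => intro cs; simp
  | cons s S ih =>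
    intro cs
    simp only [List.foldl_cons]
    rw [ih, PySem.List.length_pySetD]

lemma foldl_step_getD (S : List Int) : ∀ (cs : List Int) (k : Nat), k < cs.length →
    (∀ s ∈ S, 0 ≤ s ∧ s < (cs.length : Int)) →
    (S.foldl (fun c s => PySem.List.pySetD c s (PySem.List.pyGetD c s 0 + 1)) cs).getD k 0
      = cs.getD k 0 + (S.count (k : Int) : Int) := by
  induction S with
  | nil => intro cs k hk h; simp
  | cons s S ih =>
    intro cs k hk h
    obtain ⟨hs0, hslen⟩ := h s (List.mem_cons_self)
    simp only [List.foldl_cons]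
    have hset : PySem.List.pySetD cs s (PySem.List.pyGetD cs s 0 + 1)
        = cs.set s.toNat (PySem.List.pyGetD cs s 0 + 1) := PySem.List.pySetD_of_nonneg cs _ hs0
    have hlen : (cs.set s.toNat (PySem.List.pyGetD cs s 0 + 1)).length = cs.length := by simp
    rw [hset, ih _ k (by omega) (by rw [hlen]; exact fun t ht => h t (List.mem_cons_of_mem s ht))]
    have hpg : PySem.List.pyGetD cs s 0 = cs.getD s.toNat 0 := by
      have hcast : s = ((s.toNat : Nat) : Int) := by omega
      conv_lhs => rw [hcast, PySem.List.pyGetD_natCast]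
    rw [getD_set_eq cs s.toNat k _ hk, List.count_cons]
    by_cases he : s.toNat = k
    · have : ((k : Nat) : Int) = s := by omega
      rw [if_pos he, if_pos (by simp [this]), hpg, he]
      push_cast
      ring
    · have : ¬ ((k : Nat) : Int) == s := by simp; omega
      rw [if_neg he, if_neg (by simp at this ⊢; omega)]
      push_cast
      ring

lemma countP_subset_eq (L K : List Int) (p : Int → Bool) (hL : L.Nodup) (hK : K.Nodup)
    (hsub : ∀ k ∈ K, k ∈ L) (himp : ∀ i ∈ L, p i → i ∈ K) : L.countP p = K.countP p := by
  rw [List.countP_eq_length_filter, List.countP_eq_length_filter]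
  apply List.Perm.length_eq
  apply List.perm_of_nodup_nodup_toFinset_eq (hL.filter p) (hK.filter p)
  ext a
  simp only [List.mem_toFinset, List.mem_filter]
  constructor
  · rintro ⟨ha, hp⟩; exact ⟨himp a ha hp, hp⟩
  · rintro ⟨ha, hp⟩; exact ⟨hsub a ha, hp⟩

-- countP over [0..N] versus over pyRange 1 (N+1): peel off index 0
lemma countP_range_pyRange (N : Nat) (p : Int → Bool) :
    ((List.range (N + 1)).countP (fun i : Nat => p (i : Int)))
      = (if p 0 then 1 else 0) + (PySem.List.pyRange 1 ((N : Int) + 1) 1).countP p := by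
  rw [PySem.List.pyRange_one, show ((N : Int) + 1 - 1).toNat = N by omega, List.countP_map,
    List.range_succ_eq_map, List.countP_cons, List.countP_map]
  have hcg : (List.range N).countP ((fun i : Nat => p (i : Int)) ∘ Nat.succ)
      = (List.range N).countP (p ∘ fun k : Nat => 1 + (k : Int)) := by
    apply List.countP_congr
    intro x _
    simp only [Function.comp]
    rw [show ((Nat.succ x : Nat) : Int) = 1 + (x : Int) by push_cast; ring]
  rw [hcg]
  simp only [Nat.cast_zero]
  omega

-- the main equivalence
lemma main_eq (n : Int) (h0 : 0 ≤ n) : lotteryCoupons n = lotteryCoupons_alt n := by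
  rcases eq_or_lt_of_le h0 with h|hpos
  · rw [← h]; decide
  · have hn1 : 1 ≤ n := hpos
    simp only [lotteryCoupons, lotteryCoupons_alt, if_neg (by omega : ¬ n < 1)]
    set N := n.toNat with hNdef
    have hN : (N : Int) = n := Int.toNat_of_nonneg h0
    have hN1 : 1 ≤ N := by omega
    set L := PySem.List.pyRange 1 (n + 1) 1 with hLdef
    set f : Int → Int := fun i => sumDigitsA i 0 with hfdef
    set S := L.map f with hSdef
    -- bounds on the digit sums occurring in S
    have hmemS : ∀ s ∈ S, 1 ≤ s ∧ s ≤ n := by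
      intro s hs
      rw [hSdef] at hs
      obtain ⟨i, hi, rfl⟩ := List.mem_map.1 hs
      rw [hLdef, PySem.List.mem_pyRange_one] at hi
      have := sdA_bounds i.toNat i (by omega) le_rfl
      simp only [hfdef]
      omega
    -- counts of S: for s ≥ 1, g(n, s) = S.count s
    have hgS : ∀ s : Int, 1 ≤ s → gB n s = (S.count s : Int) := by
      intro s hs1
      have := g_cnt N s
      rw [hN] at this
      rw [this, countP_range_pyRange N (fun i => sumDigitsA i 0 == s)]
      rw [show ((N : Int) + 1) = n + 1 by omega]
      have h0f : ¬ (sumDigitsA 0 0 == s) := by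
        rw [sdA_zero]
        simp
        omega
      rw [if_neg h0f]
      rw [hSdef, List.count_eq_countP, List.countP_map]
      simp only [Nat.zero_add, hfdef, ← hLdef]
      norm_num
      rfl
    -- the zero-initialised counts array is a replicate
    have hC0 : (PySem.List.pyRange 0 (n + 1) 1).map (fun _ => (0 : Int))
        = List.replicate (N + 1) (0 : Int) := by
      rw [List.map_const', PySem.List.length_pyRange_one]
      congr 1
      omega
    rw [hC0]
    set C := S.foldl (fun counts sum => PySem.List.pySetD counts sum (PySem.List.pyGetD counts sum 0 + 1))
      (List.replicate (N + 1) (0 : Int)) with hCdef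
    have hClen : C.length = N + 1 := by
      rw [hCdef, foldl_step_length, List.length_replicate]
    have hCget : ∀ k : Nat, k < N + 1 → C.getD k 0 = (S.count (k : Int) : Int) := by
      intro k hk
      rw [hCdef, foldl_step_getD S _ k (by simpa using hk)
        (by
          intro s hs
          have := hmemS s hs
          simp only [List.length_replicate]
          omega)]
      rw [List.getD_replicate (x := (0 : Int)) hk]
      ring
    -- the maximum of A's counts array
    obtain ⟨m, hm⟩ : ∃ m, PySem.List.max? C (fun y => y) = some m := by
      cases hx : PySem.List.max? C (fun y => y) with
      | none =>
        rw [PySem.List.max?_eq_none_iff] at hx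
        have := hClen
        rw [hx] at this
        simp at this
      | some m => exact ⟨m, rfl⟩
    have hmmax : ∀ y ∈ C, y ≤ m := PySem.List.max?_isMax hm
    have hcount_mem : ∀ k : Nat, k < N + 1 → (S.count (k : Int) : Int) ∈ C := by
      intro k hk
      rw [← hCget k hk, List.getD_eq_getElem C 0 (by omega)]
      exact List.getElem_mem _
    obtain ⟨kA, hkA, hCkA⟩ := List.mem_iff_getElem.1 (PySem.List.max?_mem hm)
    have hmval : m = (S.count ((kA : Nat) : Int) : Int) := by
      rw [← hCkA, ← List.getD_eq_getElem C 0 hkA, hCget kA (by omega)]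
    -- 1 is a digit sum that occurs (n ≥ 1), so m ≥ 1
    have h1S : (1 : Int) ∈ S := by
      rw [hSdef]
      have h1L : (1 : Int) ∈ L := by
        rw [hLdef, PySem.List.mem_pyRange_one]
        omega
      have hf1 : f 1 = 1 := by
        rw [hfdef]
        have := sdA_split 0 1 le_rfl (by norm_num) (by norm_num)
        simpa [sdA_zero] using this
      rw [← hf1]
      exact List.mem_map_of_mem h1L
    have hm1 : 1 ≤ m := by
      have hc1 : 1 ≤ S.count (1 : Int) := List.count_pos_iff.2 h1S
      have := hmmax _ (by simpa using hcount_mem 1 (by omega))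
      omega
    -- every positive-count digit sum lies in [1, 9 * width]
    set W := widthLoop n 0 with hWdef
    have hW1 : 1 ≤ W := width_pos n hn1
    have hsW : ∀ s ∈ S, s ≤ 9 * W := by
      intro s hs
      rw [hSdef] at hs
      obtain ⟨i, hi, rfl⟩ := List.mem_map.1 hs
      rw [hLdef, PySem.List.mem_pyRange_one] at hi
      have h1 := ds_le_width i.toNat i (by omega) le_rfl
      have h2 := width_mono N i n (by omega) (by omega) (by omega)
      simp only [hfdef]
      omega
    -- B's counts list
    set Lw := PySem.List.pyRange 1 (9 * W + 1) 1 with hLwdef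
    have hLwmem : ∀ s ∈ Lw, 1 ≤ s := by
      intro s hs
      rw [hLwdef, PySem.List.mem_pyRange_one] at hs
      omega
    have hBcounts : Lw.map (fun s => gB n s) = Lw.map (fun s => (S.count s : Int)) := by
      apply List.map_congr_left
      intro s hs
      exact hgS s (hLwmem s hs)
    rw [hBcounts]
    set counts := Lw.map (fun s => (S.count s : Int)) with hcountsdef
    -- B's max equals A's max
    have hle : ∀ y ∈ counts, y ≤ m := by
      intro y hy
      rw [hcountsdef] at hy
      obtain ⟨s, hs, rfl⟩ := List.mem_map.1 hy
      have hs1 := hLwmem s hs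
      by_cases hsn : s ≤ n
      · have hcast : s = ((s.toNat : Nat) : Int) := by omega
        rw [hcast]
        exact hmmax _ (hcount_mem s.toNat (by omega))
      · have : S.count s = 0 := by
          rw [List.count_eq_zero]
          intro hmem
          have := hmemS s hmem
          omega
        rw [this]
        omega
    have hmem_counts : m ∈ counts := by
      have hkAS : ((kA : Nat) : Int) ∈ S := by
        rw [← List.count_pos_iff]
        omega
      have hkAW : (1 : Int) ≤ (kA : Int) ∧ ((kA : Nat) : Int) ≤ 9 * W := by
        have h1 := hmemS _ hkAS
        have h2 := hsW _ hkAS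
        exact ⟨by omega, h2⟩
      have : ((kA : Nat) : Int) ∈ Lw := by
        rw [hLwdef, PySem.List.mem_pyRange_one]
        omega
      rw [hmval, hcountsdef]
      exact List.mem_map_of_mem this
    obtain ⟨b, hb⟩ : ∃ b, PySem.List.max? counts (fun y => y) = some b := by
      cases hx : PySem.List.max? counts (fun y => y) with
      | none =>
        rw [PySem.List.max?_eq_none_iff] at hx
        rw [hx] at hmem_counts
        simp at hmem_counts
      | some b => exact ⟨b, rfl⟩
    have hbm : b = m := by
      have h1 : b ≤ m := hle b (PySem.List.max?_mem hb)
      have h2 : m ≤ b := PySem.List.max?_isMax hb m hmem_counts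
      omega
    rw [hm, hb]
    simp only [Option.getD_some, hbm]
    -- A's tally loop is a countP; both tallies equal the countP over the distinct digit sums
    refine Eq.trans (PySem.List.foldl_ite_add_one (fun i => PySem.List.pyGetD C i 0 = m) L 0) ?_
    have hqA : L.countP (fun i => decide (PySem.List.pyGetD C i 0 = m))
        = L.countP (fun i => decide ((S.count i : Int) = m)) := by
      apply List.countP_congr
      intro x hx
      rw [hLdef, PySem.List.mem_pyRange_one] at hx
      have hcast : x = ((x.toNat : Nat) : Int) := by omega
      have : PySem.List.pyGetD C x 0 = (S.count x : Int) := by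
        conv_lhs => rw [hcast, PySem.List.pyGetD_natCast]
        rw [hCget x.toNat (by omega), ← hcast]
      simp [this]
    have hqB : counts.count m = Lw.countP (fun s => decide ((S.count s : Int) = m)) := by
      rw [hcountsdef, List.count_eq_countP, List.countP_map]
      apply List.countP_congr
      intro x _
      simp
    rw [hqA, hqB]
    have hKsub : ∀ k ∈ PySem.Set.ofList S, k ∈ L := by
      intro k hk
      have hkS := (PySem.Set.mem_ofList S k).1 hk
      have := hmemS k hkS
      rw [hLdef, PySem.List.mem_pyRange_one]
      omega
    have hKsubW : ∀ k ∈ PySem.Set.ofList S, k ∈ Lw := by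
      intro k hk
      have hkS := (PySem.Set.mem_ofList S k).1 hk
      have h1 := hmemS k hkS
      have h2 := hsW k hkS
      rw [hLwdef, PySem.List.mem_pyRange_one]
      omega
    have himp : ∀ i : Int, decide ((S.count i : Int) = m) = true → i ∈ PySem.Set.ofList S := by
      intro i hp
      have : (S.count i : Int) = m := by simpa using hp
      apply (PySem.Set.mem_ofList S i).2
      rw [← List.count_pos_iff]
      omega
    rw [countP_subset_eq L (PySem.Set.ofList S) _ (by rw [hLdef]; exact PySem.List.nodup_pyRange_one 1 (n + 1))
      (PySem.Set.nodup_ofList S) hKsub (fun i _ hp => himp i hp)]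
    rw [countP_subset_eq Lw (PySem.Set.ofList S) _ (by rw [hLwdef]; exact PySem.List.nodup_pyRange_one 1 (9 * W + 1))
      (PySem.Set.nodup_ofList S) hKsubW (fun i _ hp => himp i hp)]
    push_cast
    ring

-- ===== VERDICT (by name: the statement is the Claim_ definition above) =====
theorem lotteryCoupons_spec : Claim_equal_lotteryCoupons := by
  intro n _ hpre
  unfold Spec_lotteryCoupons
  exact main_eq n hpre

theorem lotteryCoupons_raises : Claim_raises_lotteryCoupons := by
  unfold Claim_raises_lotteryCoupons
  exact ⟨fun n _ hr => by unfold Raises_lotteryCoupons at hr; unfold Pre_lotteryCoupons; omega, by decide⟩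

-- witness self-check: at n = -1 the raises region holds and B's port returns the stated literal
theorem lotteryCoupons_raises_ok :
    Raises_lotteryCoupons pvRaiseWitness_lotteryCoupons ∧
      lotteryCoupons_alt pvRaiseWitness_lotteryCoupons = pvRaiseWitnessOut_lotteryCoupons := by
  have h := lotteryCoupons_raises
  unfold Claim_raises_lotteryCoupons at h
  exact ⟨h.2.2.1, h.2.2.2⟩
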